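-- pv_equiv track=rewrite | github.com/hwikookchoe/hwikookchoe | Baekjoon/Recursion/13913.py | f
-- ===== SOURCE A (Python) =====
-- def f(n, k):
--     if n >= k:
--         return n-k, [*range(n, k-1, -1)]
--     elif k == 1:
--         return 1, [0, 1]
--     elif k % 2:
--         a = f(n, k-1)
--         b = f(n, k+1)
--         if a[0] < b[0]:
--             return a[0]+1, a[1]+[k]
--         else:
--             return b[0]+1, b[1]+[k]
--     else:
--         b = f(n, k//2)
--         if k-n < b[0]+1:
--             return k-n, [*range(n, k+1)]
--         else:
--             return b[0]+1, b[1]+[k]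
-- ===== SOURCE B (Python) =====
-- def f(n, k):
--     # Two phases: (1) compute the cost of each needed subproblem once, memoized
--     # on k with plain ints (no list building); (2) rebuild the path iteratively,
--     # back-to-front, by replaying the decisions against the cost table.
--     memo = {}
--
--     def cost(j):
--         if j in memo:
--             return memo[j]
--         if n >= j:
--             c = n - j
--         elif j == 1:
--             c = 1
--         elif j % 2:
--             c = min(cost(j - 1), cost(j + 1)) + 1
--         else:
--             c = min(cost(j // 2) + 1, j - n)
--         memo[j] = c
--         return c
--
--     total = cost(k)
--     tail = []
--     j = k
--     while True:
--         if n >= j: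
--             return total, [*range(n, j - 1, -1)] + tail
--         if j == 1:
--             return total, [0, 1] + tail
--         if j % 2:
--             tail = [j] + tail
--             j = j - 1 if cost(j - 1) < cost(j + 1) else j + 1
--         else:
--             if j - n < cost(j // 2) + 1:
--                 return total, [*range(n, j + 1)] + tail
--             tail = [j] + tail
--             j = j // 2
-- ===== Notes on version B (the rewrite author's own statement) =====
-- stated objective: alternative
-- what changed: B splits the problem in two phases: a memoized int-only cost function (each subproblem solved once, no list building), then a separate back-to-front iterative path reconstruction that replays the decisions against the cost table, instead of A's single overlapping recursion that builds (cost, list) pairs at every node.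
import Mathlib
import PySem

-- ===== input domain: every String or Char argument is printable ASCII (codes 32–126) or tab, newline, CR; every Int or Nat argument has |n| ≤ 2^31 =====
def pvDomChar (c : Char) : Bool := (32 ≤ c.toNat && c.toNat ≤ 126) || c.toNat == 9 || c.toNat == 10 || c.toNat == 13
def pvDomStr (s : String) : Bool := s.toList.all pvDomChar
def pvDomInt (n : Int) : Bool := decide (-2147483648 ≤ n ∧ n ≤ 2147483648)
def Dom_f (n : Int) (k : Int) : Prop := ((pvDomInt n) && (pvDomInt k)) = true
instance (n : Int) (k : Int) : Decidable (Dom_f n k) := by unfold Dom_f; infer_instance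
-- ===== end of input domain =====

-- B replaces A's pair-building overlapping recursion by a memoized int-only cost
-- table plus a separate iterative back-to-front path reconstruction; values and
-- tie-breaking are identical everywhere A terminates.

-- ===== PORT A =====
-- Fuel makes the (possibly non-terminating outside Pre_) Python recursion total;
-- none = the fuel ran out (cannot happen under Pre_f, proved below).
def fGo (n : Int) : Nat → Int → Option (Int × List Int)
  | 0, _ => none
  | fl+1, k =>
    if n ≥ k then some (n - k, PySem.List.pyRange n (k-1) (-1))
    else if k = 1 then some (1, [0, 1])
    else if PySem.Int.mod k 2 ≠ 0 then
      match fGo n fl (k-1), fGo n fl (k+1) with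
      | some a, some b =>
        some (if a.1 < b.1 then (a.1 + 1, a.2 ++ [k]) else (b.1 + 1, b.2 ++ [k]))
      | _, _ => none
    else
      match fGo n fl (PySem.Int.floordiv k 2) with
      | some b =>
        some (if k - n < b.1 + 1 then (k - n, PySem.List.pyRange n (k+1) 1)
              else (b.1 + 1, b.2 ++ [k]))
      | none => none

def f (n : Int) (k : Int) : Int × List Int :=
  (fGo n ((2*k+4).toNat + 1) k).getD (0, [])

-- ===== PORT B =====
-- Phase 1 of Source B: memoized cost (ints only), the memo dict threaded through.
def cGo (n : Int) :
    Nat → PySem.Dict Int Int → Int → Option (PySem.Dict Int Int × Int)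
  | 0, _, _ => none
  | fl+1, m, j =>
    match PySem.Dict.get? m j with
    | some c => some (m, c)
    | none =>
      if n ≥ j then some (m.insert j (n - j), n - j)
      else if j = 1 then some (m.insert j 1, 1)
      else if PySem.Int.mod j 2 ≠ 0 then
        match cGo n fl m (j-1) with
        | none => none
        | some (m1, a) =>
          match cGo n fl m1 (j+1) with
          | none => none
          | some (m2, b) =>
            let c := min a b + 1
            some (m2.insert j c, c)
      else
        match cGo n fl m (PySem.Int.floordiv j 2) with
        | none => none
        | some (m1, b) =>
          let c := min (b + 1) (j - n)
          some (m1.insert j c, c)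

-- Phase 2 of Source B: the while-loop rebuilding the path back-to-front with a
-- suffix accumulator `tail`, consulting the cost function for each decision.
def pGo (n : Int) :
    Nat → PySem.Dict Int Int → Int → List Int →
    Option (PySem.Dict Int Int × List Int)
  | 0, _, _, _ => none
  | fl+1, m, j, tail =>
    if n ≥ j then some (m, PySem.List.pyRange n (j-1) (-1) ++ tail)
    else if j = 1 then some (m, [0, 1] ++ tail)
    else if PySem.Int.mod j 2 ≠ 0 then
      match cGo n fl m (j-1) with
      | none => none
      | some (m1, a) =>
        match cGo n fl m1 (j+1) with
        | none => none
        | some (m2, b) =>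
          pGo n fl m2 (if a < b then j - 1 else j + 1) ([j] ++ tail)
    else
      match cGo n fl m (PySem.Int.floordiv j 2) with
      | none => none
      | some (m1, b) =>
        if j - n < b + 1 then some (m1, PySem.List.pyRange n (j+1) 1 ++ tail)
        else pGo n fl m1 (PySem.Int.floordiv j 2) ([j] ++ tail)

def f_alt (n : Int) (k : Int) : Int × List Int :=
  match cGo n ((2*k+4).toNat + 1) PySem.Dict.empty k with
  | none => (0, [])
  | some (m, c) =>
    match pGo n ((2*k+4).toNat + 1) m k [] with
    | none => (c, [])
    | some (_, p) => (c, p)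

-- ===== PRECONDITION & SPEC =====
-- Pre_f excludes exactly the inputs (n < k ∧ k ≤ 0) on which the Python
-- recursion never terminates (RecursionError).
def Pre_f (n : Int) (k : Int) : Prop := k ≤ n ∨ 1 ≤ k
instance (n : Int) (k : Int) : Decidable (Pre_f n k) := by unfold Pre_f; infer_instance
def pvWitness_f : Int × Int := (1, 9)

def Spec_f (n : Int) (k : Int) (out : Int × List Int) : Prop := out = f_alt n k
instance (n : Int) (k : Int) (out : Int × List Int) : Decidable (Spec_f n k out) := by
  unfold Spec_f; infer_instance

-- ===== CLAIM =====
def Claim_equal_f : Prop := ∀ (n : Int) (k : Int), Dom_f n k → Pre_f n k → Spec_f n k (f n k)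

-- ===== LEMMAS AND PROOFS =====

-- the value A's recursion computes, independent of fuel
def AVal (n k : Int) (r : Int × List Int) : Prop := ∃ fl, fGo n fl k = some r

-- memo invariant: every stored cost is the first component of A's value there
def CInv (n : Int) (m : PySem.Dict Int Int) : Prop :=
  ∀ j c, PySem.Dict.get? m j = some c → ∃ r, AVal n j r ∧ r.1 = c

-- fuel monotonicity for A's evaluator
theorem fGo_mono (n : Int) : ∀ (fl : Nat) (k : Int) (r : Int × List Int),
    fGo n fl k = some r → fGo n (fl+1) k = some r := by
  intro fl
  induction fl with
  | zero => intro k r h; simp [fGo] at h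
  | succ fl ih =>
    intro k r h
    rw [fGo] at h ⊢
    split_ifs at h ⊢ with h1 h2 h3
    · exact h
    · exact h
    · rcases ha : fGo n fl (k-1) with _ | a
      · rw [ha] at h; simp at h
      · rcases hb : fGo n fl (k+1) with _ | b
        · rw [ha, hb] at h; simp at h
        · rw [ha, hb] at h; rw [ih _ _ ha, ih _ _ hb]; exact h
    · rcases hb : fGo n fl (PySem.Int.floordiv k 2) with _ | b
      · rw [hb] at h; simp at h
      · rw [hb] at h; rw [ih _ _ hb]; exact h

theorem fGo_mono_le (n : Int) (fl fl' : Nat) (k : Int) (r : Int × List Int)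
    (hle : fl ≤ fl') (h : fGo n fl k = some r) : fGo n fl' k = some r := by
  induction fl', hle using Nat.le_induction with
  | base => exact h
  | succ m hmm ih => exact fGo_mono n m k r ih

theorem AVal_unique (n k : Int) (r r' : Int × List Int)
    (h : AVal n k r) (h' : AVal n k r') : r = r' := by
  obtain ⟨fl, h⟩ := h; obtain ⟨fl', h'⟩ := h'
  rcases Nat.le_total fl fl' with hle | hle
  · have hh := fGo_mono_le n fl fl' k r hle h; rw [hh] at h'; exact (Option.some.inj h')
  · have hh := fGo_mono_le n fl' fl k r' hle h'; rw [hh] at h; exact (Option.some.inj h).symm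

theorem CInv_empty (n : Int) : CInv n PySem.Dict.empty := by
  intro j c h; simp [PySem.Dict.get?, PySem.Dict.empty] at h

theorem CInv_insert (n : Int) (m : PySem.Dict Int Int) (k c : Int)
    (r : Int × List Int) (hm : CInv n m) (hr : AVal n k r) (hc : r.1 = c) :
    CInv n (m.insert k c) := by
  intro j d hj
  by_cases hjk : j = k
  · subst hjk
    rw [PySem.Dict.get?_insert_self] at hj
    cases hj; exact ⟨r, hr, hc⟩
  · rw [PySem.Dict.get?_insert_of_ne] at hj
    · exact hm j d hj
    · exact hjk

-- phase-1 simulation: wherever A's evaluator succeeds, the memoized cost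
-- evaluator succeeds with the cost component of A's value
theorem cGo_sim (n : Int) : ∀ (fl : Nat) (m : PySem.Dict Int Int)
    (k : Int) (r : Int × List Int), CInv n m → fGo n fl k = some r →
    ∃ m', cGo n fl m k = some (m', r.1) ∧ CInv n m' := by
  intro fl
  induction fl with
  | zero => intro m k r _ h; simp [fGo] at h
  | succ fl ih =>
    intro m k r hm h
    have hAVal : AVal n k r := ⟨fl + 1, h⟩
    rw [fGo] at h
    rw [cGo]
    rcases hget : PySem.Dict.get? m k with _ | c0
    · split_ifs at h ⊢ with h1 h2 h3
      · obtain rfl : (n - k, PySem.List.pyRange n (k-1) (-1)) = r := Option.some.inj h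
        exact ⟨_, rfl, CInv_insert n m k _ _ hm hAVal rfl⟩
      · obtain rfl : ((1 : Int), ([0, 1] : List Int)) = r := Option.some.inj h
        exact ⟨_, rfl, CInv_insert n m k _ _ hm hAVal rfl⟩
      · rcases ha : fGo n fl (k-1) with _ | a
        · rw [ha] at h; simp at h
        · rcases hb : fGo n fl (k+1) with _ | b
          · rw [ha, hb] at h; simp at h
          · rw [ha, hb] at h
            obtain rfl : (if a.1 < b.1 then (a.1 + 1, a.2 ++ [k]) else (b.1 + 1, b.2 ++ [k])) = r :=
              Option.some.inj h
            obtain ⟨m1, hm1, hI1⟩ := ih m (k-1) a hm ha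
            obtain ⟨m2, hm2, hI2⟩ := ih m1 (k+1) b hI1 hb
            have hcost : (if a.1 < b.1 then (a.1 + 1, a.2 ++ [k])
                else (b.1 + 1, b.2 ++ [k])).1 = min a.1 b.1 + 1 := by
              split_ifs with hab <;> simp <;> omega
            refine ⟨m2.insert k (min a.1 b.1 + 1), ?_, ?_⟩
            · simp only [hm1, hm2, hcost]
            · exact CInv_insert n m2 k _ _ hI2 hAVal hcost
      · rcases hb : fGo n fl (PySem.Int.floordiv k 2) with _ | b
        · rw [hb] at h; simp at h
        · rw [hb] at h
          obtain rfl : (if k - n < b.1 + 1 then (k - n, PySem.List.pyRange n (k+1) 1)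
              else (b.1 + 1, b.2 ++ [k])) = r := Option.some.inj h
          obtain ⟨m1, hm1, hI1⟩ := ih m (PySem.Int.floordiv k 2) b hm hb
          have hcost : (if k - n < b.1 + 1 then (k - n, PySem.List.pyRange n (k+1) 1)
              else (b.1 + 1, b.2 ++ [k])).1 = min (b.1 + 1) (k - n) := by
            split_ifs with hkn <;> simp <;> omega
          refine ⟨m1.insert k (min (b.1 + 1) (k - n)), ?_, ?_⟩
          · simp only [hm1, hcost]
          · exact CInv_insert n m1 k _ _ hI1 hAVal hcost
    · obtain ⟨r', hr', hc'⟩ := hm k c0 hget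
      have : r' = r := AVal_unique n k r' r hr' hAVal
      subst this
      exact ⟨m, by rw [hc'], hm⟩

-- phase-2 simulation: the reconstruction loop produces A's path followed by
-- the accumulated suffix
theorem pGo_sim (n : Int) : ∀ (fl : Nat) (m : PySem.Dict Int Int)
    (k : Int) (tail : List Int) (r : Int × List Int), CInv n m → fGo n fl k = some r →
    ∃ m', pGo n fl m k tail = some (m', r.2 ++ tail) := by
  intro fl
  induction fl with
  | zero => intro m k tail r _ h; simp [fGo] at h
  | succ fl ih =>
    intro m k tail r hm h
    rw [fGo] at h
    rw [pGo]
    split_ifs at h ⊢ with h1 h2 h3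
    · obtain rfl : (n - k, PySem.List.pyRange n (k-1) (-1)) = r := Option.some.inj h
      exact ⟨m, rfl⟩
    · obtain rfl : ((1 : Int), ([0, 1] : List Int)) = r := Option.some.inj h
      exact ⟨m, rfl⟩
    · rcases ha : fGo n fl (k-1) with _ | a
      · rw [ha] at h; simp at h
      · rcases hb : fGo n fl (k+1) with _ | b
        · rw [ha, hb] at h; simp at h
        · rw [ha, hb] at h
          obtain rfl : (if a.1 < b.1 then (a.1 + 1, a.2 ++ [k]) else (b.1 + 1, b.2 ++ [k])) = r :=
            Option.some.inj h
          obtain ⟨m1, hm1, hI1⟩ := cGo_sim n fl m (k-1) a hm ha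
          obtain ⟨m2, hm2, hI2⟩ := cGo_sim n fl m1 (k+1) b hI1 hb
          simp only [hm1, hm2]
          by_cases hab : a.1 < b.1
          · obtain ⟨m', hm'⟩ := ih m2 (k-1) ([k] ++ tail) a hI2 ha
            refine ⟨m', ?_⟩
            rw [if_pos hab, hm']
            simp [hab]
          · obtain ⟨m', hm'⟩ := ih m2 (k+1) ([k] ++ tail) b hI2 hb
            refine ⟨m', ?_⟩
            rw [if_neg hab, hm']
            simp [hab]
    · rcases hb : fGo n fl (PySem.Int.floordiv k 2) with _ | b
      · rw [hb] at h; simp at h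
      · rw [hb] at h
        obtain rfl : (if k - n < b.1 + 1 then (k - n, PySem.List.pyRange n (k+1) 1)
            else (b.1 + 1, b.2 ++ [k])) = r := Option.some.inj h
        obtain ⟨m1, hm1, hI1⟩ := cGo_sim n fl m (PySem.Int.floordiv k 2) b hm hb
        simp only [hm1]
        by_cases hkn : k - n < b.1 + 1
        · refine ⟨m1, ?_⟩
          rw [if_pos hkn]
          simp [hkn]
        · obtain ⟨m', hm'⟩ := ih m1 (PySem.Int.floordiv k 2) ([k] ++ tail) b hI1 hb
          refine ⟨m', ?_⟩
          rw [if_neg hkn, hm']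
          simp [hkn]

-- termination measure for A's recursion on the admitted region
def nu (n k : Int) : Nat :=
  if k ≤ n ∨ k = 1 then 0
  else if PySem.Int.mod k 2 = 0 then (2*k).toNat else (2*k + 3).toNat

-- fuel sufficiency: on Pre_f, A's evaluator succeeds once the fuel exceeds the measure
theorem fGo_suff (n : Int) : ∀ (fl : Nat) (k : Int), (k ≤ n ∨ 1 ≤ k) → nu n k < fl →
    ∃ r, fGo n fl k = some r := by
  intro fl
  induction fl with
  | zero => intro k _ h; omega
  | succ fl ih =>
    intro k hpre hnu
    rw [fGo]
    by_cases h1 : n ≥ k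
    · exact ⟨_, by rw [if_pos h1]⟩
    · have hk1 : 1 ≤ k := by omega
      by_cases h2 : k = 1
      · exact ⟨_, by rw [if_neg h1, if_pos h2]⟩
      · have hk : 2 ≤ k := by omega
        have hmod : PySem.Int.mod k 2 = k % 2 := PySem.Int.mod_eq_emod_of_pos (by norm_num)
        have hdiv : PySem.Int.floordiv k 2 = k / 2 :=
          PySem.Int.floordiv_eq_ediv_of_pos (by norm_num)
        by_cases h3 : PySem.Int.mod k 2 ≠ 0
        · -- odd k ≥ 3
          have hodd : k % 2 = 1 := by rw [hmod] at h3; omega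
          have hnuk : nu n k = (2*k + 3).toNat := by
            simp only [nu, hmod]
            rw [if_neg (by omega), if_neg (by omega)]
          have hd1 : nu n (k-1) < fl := by
            have hb1 : nu n (k-1) ≤ (2*(k-1)).toNat := by
              have hm1 : PySem.Int.mod (k-1) 2 = (k-1) % 2 :=
                PySem.Int.mod_eq_emod_of_pos (by norm_num)
              simp only [nu, hm1]
              split_ifs with hA hB
              · omega
              · omega
              · omega
            omega
          have hd2 : nu n (k+1) < fl := by
            have hb2 : nu n (k+1) ≤ (2*(k+1)).toNat := by
              have hm2 : PySem.Int.mod (k+1) 2 = (k+1) % 2 :=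
                PySem.Int.mod_eq_emod_of_pos (by norm_num)
              simp only [nu, hm2]
              split_ifs with hA hB
              · omega
              · omega
              · omega
            omega
          obtain ⟨a, ha⟩ := ih (k-1) (by omega) hd1
          obtain ⟨b, hb⟩ := ih (k+1) (by omega) hd2
          refine ⟨if a.1 < b.1 then (a.1 + 1, a.2 ++ [k]) else (b.1 + 1, b.2 ++ [k]), ?_⟩
          simp only [if_neg h1, if_neg h2, if_pos h3, ha, hb]
        · -- even k ≥ 2
          have heven : k % 2 = 0 := by rw [hmod] at h3; omega
          have hnuk : nu n k = (2*k).toNat := by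
            simp only [nu, hmod]
            rw [if_neg (by omega), if_pos (by omega)]
          have hd : nu n (PySem.Int.floordiv k 2) < fl := by
            rw [hdiv]
            have hbnd : nu n (k/2) ≤ (k + 3).toNat := by
              have hm2 : PySem.Int.mod (k/2) 2 = (k/2) % 2 :=
                PySem.Int.mod_eq_emod_of_pos (by norm_num)
              simp only [nu, hm2]
              split_ifs with hA hB
              · omega
              · omega
              · omega
            rcases lt_or_ge (k/2) 2 with hlt | hge
            · have h0 : nu n (k/2) = 0 := by simp only [nu]; rw [if_pos (by omega)]
              omega
            · omega
          obtain ⟨b, hb⟩ := ih (PySem.Int.floordiv k 2) (by rw [hdiv]; omega) hd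
          refine ⟨if k - n < b.1 + 1 then (k - n, PySem.List.pyRange n (k+1) 1)
            else (b.1 + 1, b.2 ++ [k]), ?_⟩
          simp only [if_neg h1, if_neg h2, if_neg h3, hb]

theorem nu_lt_fuel (n k : Int) : nu n k < (2*k+4).toNat + 1 := by
  simp only [nu]; split_ifs <;> omega

-- ===== VERDICT =====
theorem f_spec : Claim_equal_f := by
  intro n k _ hpre
  unfold Spec_f f f_alt
  obtain ⟨r, hr⟩ := fGo_suff n ((2*k+4).toNat + 1) k hpre (nu_lt_fuel n k)
  obtain ⟨m1, hc, hI1⟩ := cGo_sim n ((2*k+4).toNat + 1) PySem.Dict.empty k r (CInv_empty n) hr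
  obtain ⟨m2, hp⟩ := pGo_sim n ((2*k+4).toNat + 1) m1 k [] r hI1 hr
  simp only [hr, hc, hp, Option.getD_some, List.append_nil]
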